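-- pv_equiv track=rewrite | github.com/kennyhyder/hyder-media | grid/scripts/scrape-website-contacts.py | pick_best_email
-- ===== SOURCE A (Python) =====
-- PREFERRED_EMAIL_PREFIXES = [
--     'sales', 'contact', 'info', 'hello', 'inquiries', 'inquiry',
--     'colocation', 'colo', 'datacenter', 'peering',
--     'business', 'support', 'helpdesk', 'help',
--     'general', 'office', 'reception',
-- ]
--
-- def pick_best_email(emails):
--     """Pick the best email from a list, preferring sales/contact/info."""
--     if not emails:
--         return None
--
--     # Score each email
--     scored = []
--     for email in emails:
--         local = email.split('@')[0].lower()
--         score = 100  # default score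
--         for i, prefix in enumerate(PREFERRED_EMAIL_PREFIXES):
--             if local == prefix or local.startswith(prefix + '.') or local.startswith(prefix + '-'):
--                 score = i  # lower = better
--                 break
--         scored.append((score, email))
--
--     scored.sort(key=lambda x: x[0])
--     return scored[0][1]
-- ===== SOURCE B (Python) =====
-- PREFERRED_EMAIL_PREFIXES = [
--     'sales', 'contact', 'info', 'hello', 'inquiries', 'inquiry',
--     'colocation', 'colo', 'datacenter', 'peering',
--     'business', 'support', 'helpdesk', 'help',
--     'general', 'office', 'reception',
-- ]
--
-- def pick_best_email(emails):
--     """Pick the best email from a list, preferring sales/contact/info."""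
--     if not emails:
--         return None
--     for prefix in PREFERRED_EMAIL_PREFIXES:
--         for email in emails:
--             local = email.split('@')[0].lower()
--             if local == prefix or local.startswith(prefix + '.') or local.startswith(prefix + '-'):
--                 return email
--     return emails[0]
-- ===== Notes on version B (the rewrite author's own statement) =====
-- stated objective: alternative
-- what changed: Replaces score-every-email-then-stable-sort with a direct double scan: iterate the preferred prefixes in priority order and return the first email (in list order) matching the current prefix, falling back to emails[0]; no scored list and no sort are built.
import Mathlib
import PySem

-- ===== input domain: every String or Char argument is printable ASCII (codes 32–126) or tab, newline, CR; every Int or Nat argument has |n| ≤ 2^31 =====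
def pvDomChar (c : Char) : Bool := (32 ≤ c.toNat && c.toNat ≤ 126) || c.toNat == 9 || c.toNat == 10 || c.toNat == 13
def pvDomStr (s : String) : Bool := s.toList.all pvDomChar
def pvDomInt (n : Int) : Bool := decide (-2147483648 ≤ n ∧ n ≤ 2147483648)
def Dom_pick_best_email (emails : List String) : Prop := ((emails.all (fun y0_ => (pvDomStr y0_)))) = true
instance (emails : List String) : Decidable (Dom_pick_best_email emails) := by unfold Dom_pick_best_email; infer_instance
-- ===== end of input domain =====

-- B replaces A's score-every-email-then-stable-sort with a direct scan of the prefixes in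
-- priority order, returning the first email matching the current prefix (fallback emails[0]).

-- Shared helpers: both Pythons compute the local part and the match test with literally the
-- same expressions, so both ports use these two definitions.

def pvPrefixes : List String :=
  ["sales", "contact", "info", "hello", "inquiries", "inquiry",
   "colocation", "colo", "datacenter", "peering",
   "business", "support", "helpdesk", "help",
   "general", "office", "reception"]

-- email.split('@')[0].lower(); split? with a nonempty separator is always `some` of a
-- nonempty list, so the getD/headD defaults are never reached
def pvLocal (email : String) : String :=
  PySem.Str.lower (((PySem.Str.split? email "@").getD []).headD "")

-- local == prefix or local.startswith(prefix + '.') or local.startswith(prefix + '-')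
-- (the string concatenations are done exactly on the char-list side)
def pvMatch (l p : String) : Bool :=
  l == p || PySem.Chars.startswith l.toList (p.toList ++ ['.'])
         || PySem.Chars.startswith l.toList (p.toList ++ ['-'])

-- ===== PORT A =====
-- the inner 'for i, prefix in enumerate(PREFERRED_EMAIL_PREFIXES): … break'
def pvScoreLoop (l : String) : List (Int × String) → Int
  | [] => 100
  | (i, p) :: rest => if pvMatch l p then i else pvScoreLoop l rest

def pick_best_email (emails : List String) : Option String :=
  match emails with
  | [] => none
  | _ :: _ =>
    let scored := emails.foldl
      (fun acc email => acc ++ [(pvScoreLoop (pvLocal email) (PySem.List.enumerate pvPrefixes 0), email)])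
      ([] : List (Int × String))
    match PySem.List.sorted scored (fun x => x.1) with
    | (_, e) :: _ => some e
    | [] => none  -- unreachable: scored is nonempty

-- ===== PORT B =====
-- inner 'for email in emails: … return email'
def pvFindMatch (emails : List String) (p : String) : Option String :=
  emails.find? (fun email => pvMatch (pvLocal email) p)

-- outer 'for prefix in PREFERRED_EMAIL_PREFIXES: …'; fallback 'return emails[0]'
def pvGo (emails : List String) (e0 : String) : List String → String
  | [] => e0
  | p :: ps =>
    match pvFindMatch emails p with
    | some e => e
    | none => pvGo emails e0 ps

def pick_best_email_alt (emails : List String) : Option String :=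
  match emails with
  | [] => none
  | e0 :: _ => some (pvGo emails e0 pvPrefixes)

-- ===== PRECONDITION & SPEC =====
def Spec_pick_best_email (emails : List String) (out : Option String) : Prop := out = pick_best_email_alt emails
instance (emails : List String) (out : Option String) : Decidable (Spec_pick_best_email emails out) := by unfold Spec_pick_best_email; infer_instance

-- ===== CLAIM (what is proved, stated in full; the proofs are below) =====
def Claim_equal_pick_best_email : Prop := ∀ (emails : List String), Dom_pick_best_email emails → Spec_pick_best_email emails (pick_best_email emails)

-- ===== LEMMAS AND PROOFS =====

-- A's score of an email, characterised through findIdx? on the plain prefix list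
def pvScoreW (ps : List String) (e : String) : Int :=
  match ps.findIdx? (fun p => pvMatch (pvLocal e) p) with
  | some i => (i : Int)
  | none => ((100 : Nat) : Int)

-- one step of "keep the first element with the (strictly) smallest key seen so far"
def pvStep (k : String → Int) (m : Option String) (x : String) : Option String :=
  match m with
  | none => some x
  | some b => if k x < k b then some x else m

lemma pvScoreLoop_eq (l : String) : ∀ (ps : List String) (s : Int),
    pvScoreLoop l (PySem.List.enumerate ps s) =
      (match ps.findIdx? (fun p => pvMatch l p) with
       | some i => s + (i : Int)
       | none => 100) := by
  intro ps
  induction ps with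
  | nil => intro s; simp [PySem.List.enumerate_nil, pvScoreLoop]
  | cons p ps ih =>
    intro s
    rw [PySem.List.enumerate_cons]
    by_cases h : pvMatch l p
    · simp [pvScoreLoop, h, List.findIdx?_cons]
    · simp only [pvScoreLoop, h, if_false, List.findIdx?_cons, Bool.false_eq_true, ih (s + 1)]
      cases hf : ps.findIdx? (fun p => pvMatch l p) with
      | none => simp
      | some i => push_cast; simp; ring

lemma head?_insertBy {α : Type} (bef : α → α → Bool) (x : α) (ys : List α) :
    (PySem.List.insertBy bef x ys).head? =
      some (match ys with | [] => x | y :: _ => if bef x y then x else y) := by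
  cases ys with
  | nil => simp [PySem.List.insertBy]
  | cons y t => by_cases h : bef x y <;> simp [PySem.List.insertBy, h]

-- one step of "keep the first minimum", generic version used on (score, email) pairs
def pvStepP {α : Type} (bef : α → α → Bool) (m : Option α) (x : α) : Option α :=
  match m with
  | none => some x
  | some y => if bef x y then some x else some y

lemma head?_foldl_insertBy {α : Type} (bef : α → α → Bool) :
    ∀ (l : List α) (acc : List α),
      (l.foldl (fun acc x => PySem.List.insertBy bef x acc) acc).head? =
      l.foldl (pvStepP bef) acc.head? := by
  intro l
  induction l with
  | nil => intro acc; rfl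
  | cons x t ih =>
    intro acc
    simp only [List.foldl_cons]
    rw [ih]
    congr 1
    rw [head?_insertBy]
    cases acc with
    | nil => rfl
    | cons y t' => by_cases h : bef x y <;> simp [pvStepP, h]

lemma pairfold_eq_map (k : String → Int) :
    ∀ (l : List String) (m : Option String),
      l.foldl (fun (mm : Option (Int × String)) e =>
          pvStepP (fun a b => decide (a.1 < b.1)) mm (k e, e))
        (m.map (fun b => (k b, b)))
      = (l.foldl (pvStep k) m).map (fun b => (k b, b)) := by
  intro l
  induction l with
  | nil => intro m; rfl
  | cons e t ih =>
    intro m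
    simp only [List.foldl_cons]
    cases m with
    | none =>
      rw [show pvStep k none e = some e from rfl, ← ih (some e)]
      rfl
    | some b =>
      by_cases h : k e < k b
      · rw [show (pvStep k (some b) e) = some e by simp [pvStep, h], ← ih (some e)]
        simp [pvStepP, h]
      · rw [show (pvStep k (some b) e) = some b by simp [pvStep, h], ← ih (some b)]
        simp [pvStepP, h]

-- A, on a nonempty list, is "first email with the smallest score"
lemma A_eq_FM (e0 : String) (rest : List String) :
    pick_best_email (e0 :: rest) =
      (e0 :: rest).foldl (pvStep (pvScoreW pvPrefixes)) none := by
  have hscore : (fun email => (pvScoreLoop (pvLocal email) (PySem.List.enumerate pvPrefixes 0), email))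
      = fun email => (pvScoreW pvPrefixes email, email) := by
    funext email
    rw [pvScoreLoop_eq (pvLocal email) pvPrefixes 0]
    unfold pvScoreW
    cases pvPrefixes.findIdx? (fun p => pvMatch (pvLocal email) p) <;> simp
  show (match PySem.List.sorted ((e0 :: rest).foldl
      (fun acc email => acc ++ [(pvScoreLoop (pvLocal email) (PySem.List.enumerate pvPrefixes 0), email)])
      ([] : List (Int × String))) (fun x => x.1) with
    | (_, e) :: _ => some e
    | [] => none) = _
  rw [PySem.List.foldl_append_singleton_eq_map
      (fun email => (pvScoreLoop (pvLocal email) (PySem.List.enumerate pvPrefixes 0), email)),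
    List.nil_append, hscore]
  have hmatch : ∀ (l : List (Int × String)),
      (match l with | (_, e) :: _ => some e | [] => none) = l.head?.map (·.2) := by
    rintro (_ | ⟨⟨a, b⟩, t⟩) <;> rfl
  rw [hmatch, PySem.List.sorted_eq_foldl_insertBy, head?_foldl_insertBy, List.foldl_map]
  have h2 := pairfold_eq_map (pvScoreW pvPrefixes) (e0 :: rest) none
  rw [show Option.map (fun b => (pvScoreW pvPrefixes b, b)) none = none from rfl] at h2
  rw [show List.head? ([] : List (Int × String)) = none from rfl, h2]
  cases (e0 :: rest).foldl (pvStep (pvScoreW pvPrefixes)) none <;> simp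

lemma FM_stay (k : String → Int) :
    ∀ (l : List String) (b : String), (∀ x ∈ l, ¬ k x < k b) →
      l.foldl (pvStep k) (some b) = some b := by
  intro l
  induction l with
  | nil => intro b _; rfl
  | cons x t ih =>
    intro b h
    simp only [List.foldl_cons, pvStep]
    rw [if_neg (h x (by simp))]
    exact ih b (fun y hy => h y (by simp [hy]))

lemma FM_find_zero (k : String → Int) (e : String) :
    ∀ (l : List String) (acc : Option String),
      (∀ x ∈ l, 0 ≤ k x) → (∀ b, acc = some b → 0 < k b) →
      l.find? (fun x => decide (k x = 0)) = some e →
      l.foldl (pvStep k) acc = some e := by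
  intro l
  induction l with
  | nil => intro acc _ _ h; simp at h
  | cons x t ih =>
    intro acc hnn hacc hfind
    by_cases hx : k x = 0
    · rw [List.find?_cons_of_pos (by simp [hx])] at hfind
      have hxe : x = e := by simpa using hfind
      subst hxe
      have hstep : pvStep k acc x = some x := by
        cases acc with
        | none => rfl
        | some b => simp [pvStep, hx, hacc b rfl]
      simp only [List.foldl_cons, hstep]
      exact FM_stay k t x (fun y hy => by
        rw [hx]; exact not_lt.mpr (hnn y (by simp [hy])))
    · rw [List.find?_cons_of_neg (by simp [hx])] at hfind
      have hxpos : 0 < k x := lt_of_le_of_ne (hnn x (by simp)) (Ne.symm hx)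
      simp only [List.foldl_cons]
      have hnn' : ∀ y ∈ t, 0 ≤ k y := fun y hy => hnn y (by simp [hy])
      cases acc with
      | none =>
        exact ih (some x) hnn' (fun b hb => by cases hb; exact hxpos) hfind
      | some b =>
        have hbpos : 0 < k b := hacc b rfl
        by_cases hlt : k x < k b
        · rw [show pvStep k (some b) x = some x by simp [pvStep, hlt]]
          exact ih (some x) hnn' (fun c hc => by cases hc; exact hxpos) hfind
        · rw [show pvStep k (some b) x = some b by simp [pvStep, hlt]]
          exact ih (some b) hnn' (fun c hc => by cases hc; exact hbpos) hfind

lemma FM_congr (k1 k2 : String → Int) :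
    ∀ (l : List String) (b : String),
      (∀ x ∈ b :: l, ∀ y ∈ b :: l, (k1 x < k1 y ↔ k2 x < k2 y)) →
      l.foldl (pvStep k1) (some b) = l.foldl (pvStep k2) (some b) := by
  intro l
  induction l with
  | nil => intro b _; rfl
  | cons x t ih =>
    intro b h
    simp only [List.foldl_cons, pvStep]
    by_cases hlt : k1 x < k1 b
    · rw [if_pos hlt, if_pos ((h x (by simp) b (by simp)).mp hlt)]
      exact ih x (fun u hu v hv =>
        h u (by simp only [List.mem_cons] at hu ⊢; tauto) v (by simp only [List.mem_cons] at hv ⊢; tauto))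
    · rw [if_neg hlt, if_neg (fun hc => hlt ((h x (by simp) b (by simp)).mpr hc))]
      exact ih b (fun u hu v hv =>
        h u (by simp only [List.mem_cons] at hu ⊢; tauto) v (by simp only [List.mem_cons] at hv ⊢; tauto))

lemma scoreW_nonneg (ps : List String) (x : String) : 0 ≤ pvScoreW ps x := by
  unfold pvScoreW
  cases ps.findIdx? (fun p => pvMatch (pvLocal x) p) <;> simp

lemma findIdx?_lt_length {α : Type} {p : α → Bool} {l : List α} {i : Nat}
    (h : l.findIdx? p = some i) : i < l.length := by
  have := List.findIdx?_eq_some_iff_findIdx_eq.mp h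
  omega

-- B, on a nonempty list, computes the same "first email with the smallest score"
lemma go_eq : ∀ (ps : List String), ps.length ≤ 100 →
    ∀ (e0 : String) (rest : List String),
      some (pvGo (e0 :: rest) e0 ps) = (e0 :: rest).foldl (pvStep (pvScoreW ps)) none := by
  intro ps
  induction ps with
  | nil =>
    intro _ e0 rest
    have h100 : ∀ x : String, pvScoreW [] x = 100 := by intro x; rfl
    simp only [pvGo, List.foldl_cons]
    rw [show pvStep (pvScoreW []) none e0 = some e0 from rfl]
    rw [FM_stay (pvScoreW []) rest e0 (fun x _ => by simp [h100])]
  | cons p ps ih =>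
    intro hlen e0 rest
    simp only [List.length_cons] at hlen
    have hlen' : ps.length ≤ 100 := by omega
    cases hf : pvFindMatch (e0 :: rest) p with
    | some e =>
      simp only [pvGo, hf]
      have hpred : (fun x => decide (pvScoreW (p :: ps) x = 0))
          = (fun email => pvMatch (pvLocal email) p) := by
        funext x
        unfold pvScoreW
        rw [List.findIdx?_cons]
        by_cases hm : pvMatch (pvLocal x) p
        · simp [hm]
        · simp only [hm, Bool.false_eq_true, if_false]
          cases hfi : ps.findIdx? (fun q => pvMatch (pvLocal x) q) with
          | none => simp
          | some i => simp; omega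
      symm
      exact FM_find_zero (pvScoreW (p :: ps)) e (e0 :: rest) none
        (fun x _ => scoreW_nonneg _ x) (by intro b hb; cases hb)
        (by rw [hpred]; exact hf)
    | none =>
      simp only [pvGo, hf]
      rw [ih hlen' e0 rest]
      have hnomatch : ∀ x ∈ e0 :: rest, pvMatch (pvLocal x) p = false := by
        intro x hx
        have := List.find?_eq_none.mp hf x hx
        simpa using this
      have hshift : ∀ x ∈ e0 :: rest, ∀ y ∈ e0 :: rest,
          (pvScoreW ps x < pvScoreW ps y ↔ pvScoreW (p :: ps) x < pvScoreW (p :: ps) y) := by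
        intro x hx y hy
        have hsx : pvScoreW (p :: ps) x =
            (match ps.findIdx? (fun q => pvMatch (pvLocal x) q) with
             | some i => (((i + 1 : Nat)) : Int) | none => ((100 : Nat) : Int)) := by
          unfold pvScoreW
          rw [List.findIdx?_cons, hnomatch x hx]
          simp only [Bool.false_eq_true, if_false]
          cases ps.findIdx? (fun q => pvMatch (pvLocal x) q) <;> simp
        have hsy : pvScoreW (p :: ps) y =
            (match ps.findIdx? (fun q => pvMatch (pvLocal y) q) with
             | some i => (((i + 1 : Nat)) : Int) | none => ((100 : Nat) : Int)) := by
          unfold pvScoreW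
          rw [List.findIdx?_cons, hnomatch y hy]
          simp only [Bool.false_eq_true, if_false]
          cases ps.findIdx? (fun q => pvMatch (pvLocal y) q) <;> simp
        rw [hsx, hsy]
        unfold pvScoreW
        cases hfx : ps.findIdx? (fun q => pvMatch (pvLocal x) q) with
        | none =>
          cases hfy : ps.findIdx? (fun q => pvMatch (pvLocal y) q) with
          | none => simp only [Nat.cast_lt]
          | some j => have := findIdx?_lt_length hfy; simp only [Nat.cast_lt]; omega
        | some i =>
          have hi := findIdx?_lt_length hfx
          cases hfy : ps.findIdx? (fun q => pvMatch (pvLocal y) q) with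
          | none => simp only [Nat.cast_lt]; omega
          | some j => have := findIdx?_lt_length hfy; simp only [Nat.cast_lt]; omega
      simp only [List.foldl_cons]
      rw [show pvStep (pvScoreW ps) none e0 = some e0 from rfl,
        show pvStep (pvScoreW (p :: ps)) none e0 = some e0 from rfl]
      exact FM_congr (pvScoreW ps) (pvScoreW (p :: ps)) rest e0 hshift

-- ===== VERDICT (by name: the statement is the Claim_ definition above) =====
theorem pick_best_email_spec : Claim_equal_pick_best_email := by
  intro emails _
  unfold Spec_pick_best_email
  cases emails with
  | nil => rfl
  | cons e0 rest =>
    rw [A_eq_FM, ← go_eq pvPrefixes (by decide) e0 rest]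
    rfl
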